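-- pv_equiv track=rewrite | github.com/EugenePetrykeiev/CryptoCourse | Day4/src/PaddingBlocks.py | padding_blocks
-- ===== SOURCE A (Python) =====
-- def padding_blocks(text: str) -> list:
--     block_size = 16
--     input_block = []
--     col_size = 4
--     div16blocks = [text[i:i + block_size] for i in range(0, len(text), block_size)]
--     for block in div16blocks:
--         block = [hex(ord(i)) for i in block]
--         while 0 < len(block) < block_size:
--             # ISO/IEC 9797-1
--             if len(block) == block_size - 1:
--                 block.append('0x01')
--             else:
--                 block.append('0x00')
--         div_block = [block[i:i + col_size] for i in range(0, len(block), col_size)]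
--         for i in range(len(div_block)):
--             for j in range(i):
--                 temp = div_block[i][j]
--                 div_block[i][j] = div_block[j][i]
--                 div_block[j][i] = temp
--         input_block.append(div_block)
--     return input_block
-- ===== SOURCE B (Python) =====
-- def padding_blocks(text: str) -> list:
--     n = len(text)
--
--     def cell(b, p):
--         # value at transposed position: global char index g = b + p
--         g = b + p
--         if g < n:
--             return hex(ord(text[g]))
--         return '0x01' if p == 15 else '0x00'
--
--     return [[[cell(b, 4 * j + i) for j in range(4)] for i in range(4)]
--             for b in range(0, n, 16)]
-- ===== Notes on version B (the rewrite author's own statement) =====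
-- stated objective: alternative
-- what changed: B drops all intermediate structures of A (per-block hex list, while-loop padding, 4x4 chunking and in-place triangular-swap transpose) and instead emits each output cell directly by a closed-form index formula: cell (b,i,j) reads text[b+4*j+i] if in range, else the ISO/IEC 9797-1 pad byte determined by the position alone.
import Mathlib
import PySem

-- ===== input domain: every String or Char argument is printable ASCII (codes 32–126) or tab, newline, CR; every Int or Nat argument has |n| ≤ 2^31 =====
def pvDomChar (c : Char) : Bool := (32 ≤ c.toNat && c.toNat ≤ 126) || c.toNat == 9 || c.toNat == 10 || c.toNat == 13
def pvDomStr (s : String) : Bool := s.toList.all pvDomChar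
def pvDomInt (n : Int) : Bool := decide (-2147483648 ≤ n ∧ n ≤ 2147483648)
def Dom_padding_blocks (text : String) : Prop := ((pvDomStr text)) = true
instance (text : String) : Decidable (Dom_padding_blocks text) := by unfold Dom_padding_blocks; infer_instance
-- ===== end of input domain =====

-- B builds no intermediate hex list, no padding loop and no transpose: each output cell
-- is computed directly from its global character index b + 4*j + i (objective: alternative).

-- shared helper: Python's hex(ord(c)) for a non-negative code point (exact for Nat)
def pyHex (n : Nat) : String := "0x" ++ String.ofList (Nat.toDigits 16 n)

-- ===== PORT A =====
-- the while-loop: appends '0x01' at length 15, else '0x00', while 0 < len < 16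
def padLoopA (block : List String) : List String :=
  if 0 < block.length ∧ block.length < 16 then
    if block.length = 16 - 1 then padLoopA (block ++ ["0x01"])
    else padLoopA (block ++ ["0x00"])
  else block
termination_by 16 - block.length
decreasing_by all_goals (simp; omega)

-- the in-place triangular swap: for i in range(len), for j in range(i): swap m[i][j], m[j][i]
-- (indices from range are non-negative, so Nat indexing via List.range/getD/set is exact here)
def transposeLoopA (db : List (List String)) : List (List String) :=
  (List.range db.length).foldl (fun m i =>
    (List.range i).foldl (fun m j =>
      let temp := (m.getD i []).getD j ""
      let m := m.set i ((m.getD i []).set j ((m.getD j []).getD i ""))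
      let m := m.set j ((m.getD j []).set i temp)
      m) m) db

def padding_blocks (text : String) : List (List (List String)) :=
  let block_size : Int := 16
  let col_size : Int := 4
  let div16blocks := (PySem.List.pyRange 0 text.toList.length block_size).map
    (fun i => PySem.List.slice text.toList (some i) (some (i + block_size)))
  div16blocks.foldl (fun input_block block =>
    let block := block.map (fun c => pyHex c.toNat)
    let block := padLoopA block
    let div_block := (PySem.List.pyRange 0 block.length col_size).map
      (fun i => PySem.List.slice block (some i) (some (i + col_size)))
    let div_block := transposeLoopA div_block
    input_block ++ [div_block]) []

-- ===== PORT B =====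
-- Source B's cell(b, p): the value at transposed position p of the block starting at b
def cellB (cs : List Char) (n b p : Int) : String :=
  let g := b + p
  if g < n then pyHex ((PySem.List.pyGetD cs g ' ').toNat)
  else if p = 15 then "0x01" else "0x00"

def padding_blocks_alt (text : String) : List (List (List String)) :=
  let cs := text.toList
  let n : Int := cs.length
  (PySem.List.pyRange 0 n 16).map (fun b =>
    (List.range 4).map (fun (i : Nat) =>
      (List.range 4).map (fun (j : Nat) => cellB cs n b (4 * (j : Int) + (i : Int)))))

-- ===== PRECONDITION & SPEC =====
def Spec_padding_blocks (text : String) (out : List (List (List String))) : Prop := out = padding_blocks_alt text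
instance (text : String) (out : List (List (List String))) : Decidable (Spec_padding_blocks text out) := by unfold Spec_padding_blocks; infer_instance

-- ===== CLAIM (what is proved, stated in full; the proofs are below) =====
def Claim_equal_padding_blocks : Prop := ∀ (text : String), Dom_padding_blocks text → Spec_padding_blocks text (padding_blocks text)

-- ===== LEMMAS AND PROOFS =====

lemma foldl_app_eq_map {α β : Type} (f : α → β) :
    ∀ (xs : List α) (acc : List β), xs.foldl (fun a b => a ++ [f b]) acc = acc ++ xs.map f := by
  intro xs
  induction xs with
  | nil => simp
  | cons x xs ih => intro acc; simp [List.foldl, ih]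

lemma padLoopA_eq (k : Nat) :
    ∀ (l : List String), 16 - l.length ≤ k → 0 < l.length → l.length ≤ 16 →
    padLoopA l = if l.length < 16 then l ++ (List.replicate (16 - l.length - 1) "0x00" ++ ["0x01"]) else l := by
  induction k with
  | zero =>
    intro l hk h0 h16
    have : l.length = 16 := by omega
    rw [padLoopA]
    simp [this]
  | succ k ih =>
    intro l hk h0 h16
    rcases Nat.lt_or_ge l.length 16 with hlt | hge
    · rw [padLoopA]
      simp only [h0, hlt, and_self, if_pos]
      by_cases h15 : l.length = 15
      · rw [if_pos (by omega)]
        rw [ih (l ++ ["0x01"]) (by simp; omega) (by simp) (by simp; omega)]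
        simp [h15]
      · rw [if_neg (by omega)]
        rw [ih (l ++ ["0x00"]) (by simp; omega) (by simp) (by simp; omega)]
        have hlen : (l ++ ["0x00"]).length = l.length + 1 := by simp
        have h1 : 16 - l.length - 1 = (16 - (l.length + 1) - 1) + 1 := by omega
        rw [hlen, if_pos (show l.length + 1 < 16 by omega), h1, List.replicate_succ]
        simp
    · rw [padLoopA]
      have : l.length = 16 := by omega
      simp [this]

-- A's per-block computation (chunk → hexify → pad → 4-chunk → triangular swap), named for the proof
def bodyA (block0 : List Char) : List (List String) :=
  let block := block0.map (fun c : Char => pyHex c.toNat)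
  let block := padLoopA block
  let div_block := (PySem.List.pyRange 0 ((block.length : Int)) 4).map
    (fun i => PySem.List.slice block (some i) (some (i + 4)))
  transposeLoopA div_block

-- A's chunk/transpose pipeline on a 16-element list P is direct indexing P[4*j+i]
lemma transpose_eq (P : List String) (hP : P.length = 16) :
    transposeLoopA ((PySem.List.pyRange 0 ((P.length : Int)) 4).map
      (fun i => PySem.List.slice P (some i) (some (i + 4)))) =
    (List.range 4).map (fun i => (List.range 4).map (fun j => P.getD (4 * j + i) "")) := by
  rw [hP]
  have hr : PySem.List.pyRange 0 ((16 : Nat) : Int) 4 = [0, 4, 8, 12] := by decide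
  rw [hr]
  rcases P with _ | ⟨a0, P⟩; · simp at hP
  rcases P with _ | ⟨a1, P⟩; · simp at hP
  rcases P with _ | ⟨a2, P⟩; · simp at hP
  rcases P with _ | ⟨a3, P⟩; · simp at hP
  rcases P with _ | ⟨a4, P⟩; · simp at hP
  rcases P with _ | ⟨a5, P⟩; · simp at hP
  rcases P with _ | ⟨a6, P⟩; · simp at hP
  rcases P with _ | ⟨a7, P⟩; · simp at hP
  rcases P with _ | ⟨a8, P⟩; · simp at hP
  rcases P with _ | ⟨a9, P⟩; · simp at hP
  rcases P with _ | ⟨a10, P⟩; · simp at hP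
  rcases P with _ | ⟨a11, P⟩; · simp at hP
  rcases P with _ | ⟨a12, P⟩; · simp at hP
  rcases P with _ | ⟨a13, P⟩; · simp at hP
  rcases P with _ | ⟨a14, P⟩; · simp at hP
  rcases P with _ | ⟨a15, P⟩; · simp at hP
  rcases P with _ | ⟨a16, P⟩
  · simp [transposeLoopA, PySem.List.slice, PySem.List.clampIdx, List.range_succ]
  · simp at hP

lemma padded_getD (hx : List String) (p : Nat) (h16 : hx.length ≤ 16) (hp : p < 16) :
    (if hx.length < 16 then hx ++ (List.replicate (16 - hx.length - 1) "0x00" ++ ["0x01"]) else hx).getD p "" =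
    if p < hx.length then hx.getD p "" else if p = 15 then "0x01" else "0x00" := by
  by_cases hlt : hx.length < 16
  · rw [if_pos hlt]
    by_cases hpl : p < hx.length
    · rw [if_pos hpl, List.getD_append _ _ _ _ hpl]
    · rw [if_neg hpl]
      rw [List.getD_eq_getElem?_getD, List.getElem?_append_right (by omega)]
      by_cases h15 : p = 15
      · rw [List.getElem?_append_right (by rw [List.length_replicate]; omega)]
        have h0 : p - hx.length - (List.replicate (16 - hx.length - 1) "0x00").length = 0 := by
          rw [List.length_replicate]; omega
        rw [h0]
        simp [h15]
      · rw [List.getElem?_append_left (by rw [List.length_replicate]; omega)]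
        rw [List.getElem?_replicate]
        rw [if_pos (by omega)]
        simp [h15]
  · rw [if_neg hlt, if_pos (by omega)]


lemma chunk_cell (cs : List Char) (b : Int) (hb0 : 0 ≤ b) (hbn : b < (cs.length : Int)) (p : Nat) (hp : p < 16) :
    (if p < (PySem.List.slice cs (some b) (some (b + 16))).length then
       ((PySem.List.slice cs (some b) (some (b + 16))).map (fun c : Char => pyHex c.toNat)).getD p ""
     else if p = 15 then "0x01" else "0x00") =
    cellB cs (cs.length : Int) b (p : Int) := by
  rw [PySem.List.slice_toNat cs hb0 (by omega)]
  have h1 : (b + 16).toNat - b.toNat = 16 := by omega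
  rw [h1]
  have hlen : ((cs.drop b.toNat).take 16).length = min 16 (cs.length - b.toNat) := by
    simp [List.length_take, List.length_drop]
  unfold cellB
  by_cases hin : (b + (p : Int)) < (cs.length : Int)
  · have hpl : p < ((cs.drop b.toNat).take 16).length := by rw [hlen]; omega
    rw [if_pos hpl, if_pos hin]
    rw [List.getD_eq_getElem?_getD, List.getElem?_map]
    rw [List.getElem?_take]
    rw [if_pos hp, List.getElem?_drop]
    have hidx : b.toNat + p < cs.length := by omega
    rw [List.getElem?_eq_getElem hidx]
    have hg : PySem.List.pyGetD cs (b + (p : Int)) ' ' = cs[b.toNat + p] := by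
      rw [show b + (p : Int) = ((b.toNat + p : Nat) : Int) by omega, PySem.List.pyGetD_natCast,
        List.getD_eq_getElem?_getD, List.getElem?_eq_getElem hidx]
      rfl
    simp [hg]
  · have hpl : ¬ p < ((cs.drop b.toNat).take 16).length := by rw [hlen]; omega
    rw [if_neg hpl, if_neg hin]
    by_cases h15 : p = 15
    · simp [h15]
    · rw [if_neg h15, if_neg (by exact_mod_cast h15)]

lemma one_block_eq (cs : List Char) (b : Int) (hb0 : 0 ≤ b) (hbn : b < (cs.length : Int)) :
    bodyA (PySem.List.slice cs (some b) (some (b + 16))) =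
    (List.range 4).map (fun (i : Nat) =>
      (List.range 4).map (fun (j : Nat) => cellB cs (cs.length : Int) b (4 * (j : Int) + (i : Int)))) := by
  have hclen : (PySem.List.slice cs (some b) (some (b + 16))).length ≤ 16 ∧
      0 < (PySem.List.slice cs (some b) (some (b + 16))).length := by
    rw [PySem.List.slice_toNat cs hb0 (by omega)]
    have h1 : (b + 16).toNat - b.toNat = 16 := by omega
    rw [h1]
    simp [List.length_take, List.length_drop]
    omega
  simp only [bodyA]
  set chunk := PySem.List.slice cs (some b) (some (b + 16)) with hch
  set hx := chunk.map (fun c : Char => pyHex c.toNat) with hhx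
  have hxlen : hx.length = chunk.length := by rw [hhx]; exact List.length_map ..
  rw [padLoopA_eq 16 hx (by omega) (by omega) (by omega)]
  set P := if hx.length < 16 then hx ++ (List.replicate (16 - hx.length - 1) "0x00" ++ ["0x01"]) else hx with hPdef
  have hPlen : P.length = 16 := by
    rw [hPdef]; split_ifs with h
    · simp; omega
    · omega
  rw [transpose_eq P hPlen]
  apply List.map_congr_left
  intro i hi
  apply List.map_congr_left
  intro j hj
  have hi4 : i < 4 := List.mem_range.mp hi
  have hj4 : j < 4 := List.mem_range.mp hj
  have hp : 4 * j + i < 16 := by omega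
  rw [hPdef, padded_getD hx (4 * j + i) (by omega) hp]
  rw [hxlen, hhx, hch]
  have hcast : 4 * (j : Int) + (i : Int) = ((4 * j + i : Nat) : Int) := by push_cast; ring
  rw [hcast]
  exact chunk_cell cs b hb0 hbn (4 * j + i) hp

-- ===== VERDICT (by name: the statement is the Claim_ definition above) =====
theorem padding_blocks_spec : Claim_equal_padding_blocks := by
  intro text _
  unfold Spec_padding_blocks padding_blocks padding_blocks_alt
  show ((PySem.List.pyRange 0 ((text.toList.length : Int)) 16).map
      (fun i => PySem.List.slice text.toList (some i) (some (i + 16)))).foldl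
      (fun a b => a ++ [bodyA b]) [] = _
  rw [foldl_app_eq_map]
  rw [List.nil_append, List.map_map]
  apply List.map_congr_left
  intro b hb
  rcases (PySem.List.mem_pyRange_iff_of_pos (by norm_num) b).mp hb with ⟨h0, hlt, -⟩
  exact one_block_eq text.toList b h0 hlt
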